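-- pv_equiv track=rewrite | github.com/jsphweid/chops | lc/answers/minimum-number-of-days-to-make-m-bouquets/2022.01.13-21.19.56.py | num_bouquets
-- ===== SOURCE A (Python) =====
-- def num_bouquets(bloomDay, day, k):
--     acc, res = 0, 0
--     for num in bloomDay:
--         if day >= num:
--             acc += 1
--             if acc >= k:
--                 res += 1
--                 acc = 0
--         else:
--             acc = 0
--     return res
-- ===== SOURCE B (Python) =====
-- def num_bouquets(bloomDay, day, k):
--     # stage 1: two-pointer extraction of maximal bloomed-run lengths
--     runs = []
--     n = len(bloomDay)
--     i = 0
--     while i < n: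
--         if day >= bloomDay[i]:
--             j = i
--             while j < n and day >= bloomDay[j]:
--                 j += 1
--             runs.append(j - i)
--             i = j
--         else:
--             i += 1
--     # stage 2: each run of length L yields L // k bouquets
--     return sum(L // k for L in runs)
-- ===== Notes on version B (the rewrite author's own statement) =====
-- stated objective: alternative
-- what changed: B is staged: a two-pointer index scan first extracts the list of maximal bloomed-run lengths (an inner while advances j to the end of each run), then a separate pass sums floor(L/k) over the runs, replacing A's single element-wise count-to-k-and-reset pass; Pre_ restricts to bouquet size k >= 1, the task's natural domain, since for k <= 0 B's floor division raises (k=0) or yields negative quotients.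
-- outside the precondition, e.g. on num_bouquets([0], 0, 0): A returns 1, B raises ZeroDivisionError; on num_bouquets([1, 1], 1, -1): A returns 2, B returns -2
import Mathlib
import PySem

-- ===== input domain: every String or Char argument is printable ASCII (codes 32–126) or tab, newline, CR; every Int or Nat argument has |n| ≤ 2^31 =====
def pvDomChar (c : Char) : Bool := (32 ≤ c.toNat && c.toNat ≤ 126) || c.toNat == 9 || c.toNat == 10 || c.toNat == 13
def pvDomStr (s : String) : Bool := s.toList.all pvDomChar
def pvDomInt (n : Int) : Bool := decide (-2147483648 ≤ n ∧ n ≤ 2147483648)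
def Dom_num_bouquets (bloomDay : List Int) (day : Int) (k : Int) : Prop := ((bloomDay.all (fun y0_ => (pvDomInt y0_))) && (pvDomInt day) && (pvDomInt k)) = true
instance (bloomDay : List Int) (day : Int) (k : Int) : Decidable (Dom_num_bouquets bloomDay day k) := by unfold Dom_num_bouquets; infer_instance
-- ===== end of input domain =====

-- B replaces A's count-to-k-and-reset pass by a staged runs-then-divide computation: a
-- two-pointer index scan first extracts the lengths of the maximal bloomed runs, then a
-- second pass sums floor(L/k); equality of return values is proved for k ≥ 1 (the natural domain).

-- ===== PORT A =====
-- one loop iteration of A: bump the counter, emit a bouquet and reset when it reaches k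
def pvStepA (day k : Int) (s : Int × Int) (num : Int) : Int × Int :=
  if day ≥ num then
    let acc := s.1 + 1
    if acc ≥ k then (0, s.2 + 1) else (acc, s.2)
  else (0, s.2)

def num_bouquets (bloomDay : List Int) (day : Int) (k : Int) : Int :=
  (bloomDay.foldl (pvStepA day k) (0, 0)).2

-- ===== PORT B =====
-- the inner while of B: advance j while j < n and flower j is bloomed
def pvScan (l : List Int) (day : Int) (n j : Nat) : Nat :=
  if h : j < n ∧ day ≥ l.getD j 0 then pvScan l day n (j + 1) else j
termination_by n - j
decreasing_by omega

-- pvScan never moves j backwards (cited by pvCollect's termination proof)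
theorem pvScan_ge_fuel (l : List Int) (day : Int) (n : Nat) :
    ∀ fuel j, n - j ≤ fuel → j ≤ pvScan l day n j := by
  intro fuel
  induction fuel with
  | zero =>
    intro j hf
    rw [pvScan]
    split
    · omega
    · exact le_rfl
  | succ f ihf =>
    intro j hf
    rw [pvScan]
    split
    · rename_i h
      exact le_trans (Nat.le_succ j) (ihf (j + 1) (by omega))
    · exact le_rfl

-- the outer while of B: collect the run lengths from index i on
def pvCollect (l : List Int) (day : Int) (n i : Nat) : List Nat :=
  if hi : i < n then
    if hb : day ≥ l.getD i 0 then
      let j := pvScan l day n i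
      (j - i) :: pvCollect l day n j
    else
      pvCollect l day n (i + 1)
  else []
termination_by n - i
decreasing_by
  · have h1 : pvScan l day n i = pvScan l day n (i + 1) := by
      rw [pvScan]; rw [dif_pos ⟨hi, hb⟩]
    have h2 : i + 1 ≤ pvScan l day n (i + 1) :=
      pvScan_ge_fuel l day n (n - (i + 1)) (i + 1) le_rfl
    omega
  · omega

def num_bouquets_alt (bloomDay : List Int) (day : Int) (k : Int) : Int :=
  ((pvCollect bloomDay day bloomDay.length 0).map
    (fun (L : Nat) => PySem.Int.floordiv (L : Int) k)).sum

-- ===== PRECONDITION & SPEC =====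
-- Pre_ restricts to bouquet size k ≥ 1, the task's natural domain: for k ≤ 0 A still
-- returns (it counts every bloomed flower), but B's floor division raises on k = 0
-- and yields negative quotients for k < 0.
def Pre_num_bouquets (bloomDay : List Int) (day : Int) (k : Int) : Prop := 1 ≤ k
instance (bloomDay : List Int) (day : Int) (k : Int) : Decidable (Pre_num_bouquets bloomDay day k) := by unfold Pre_num_bouquets; infer_instance
def pvWitness_num_bouquets : List Int × Int × Int := ([1, 2, 3], 2, 2)

def Spec_num_bouquets (bloomDay : List Int) (day : Int) (k : Int) (out : Int) : Prop := out = num_bouquets_alt bloomDay day k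
instance (bloomDay : List Int) (day : Int) (k : Int) (out : Int) : Decidable (Spec_num_bouquets bloomDay day k out) := by unfold Spec_num_bouquets; infer_instance

-- ===== CLAIM (what is proved, stated in full; the proofs are below) =====
def Claim_equal_num_bouquets : Prop := ∀ (bloomDay : List Int) (day : Int) (k : Int), Dom_num_bouquets bloomDay day k → Pre_num_bouquets bloomDay day k → Spec_num_bouquets bloomDay day k (num_bouquets bloomDay day k)

-- ===== LEMMAS AND PROOFS =====

-- proof-side helpers: the runs of bloomed flowers described structurally on the list
def pvBloomPrefix (day : Int) : List Int → Nat
  | [] => 0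
  | x :: t => if day ≥ x then 1 + pvBloomPrefix day t else 0

def pvRuns (day : Int) : List Int → List Nat
  | [] => []
  | x :: t =>
    if day < x then pvRuns day t
    else
      let m := pvBloomPrefix day (x :: t)
      m :: pvRuns day ((x :: t).drop m)
termination_by l => l.length
decreasing_by
  · simp
  · have : 1 ≤ pvBloomPrefix day (x :: t) := by
      simp only [pvBloomPrefix]
      split
      · omega
      · omega
    simp only [List.length_drop, List.length_cons]
    omega

-- pvScan computes i + (length of the leading bloomed run of l.drop i)
theorem pvScan_eq_bp (l : List Int) (day : Int) :
    ∀ fuel j, l.length - j ≤ fuel →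
      pvScan l day l.length j = j + pvBloomPrefix day (l.drop j) := by
  intro fuel
  induction fuel with
  | zero =>
    intro j hf
    have hj : l.length ≤ j := by omega
    rw [pvScan, dif_neg (by omega), List.drop_eq_nil_of_le hj]
    simp [pvBloomPrefix]
  | succ f ihf =>
    intro j hf
    by_cases hj : j < l.length
    · have hdrop := List.drop_eq_getElem_cons hj
      have hget : l.getD j 0 = l[j] := List.getD_eq_getElem l 0 hj
      by_cases hb : day ≥ l[j]
      · rw [pvScan, dif_pos ⟨hj, by rw [hget]; exact hb⟩,
            ihf (j + 1) (by omega), hdrop]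
        simp only [pvBloomPrefix, if_pos hb]
        omega
      · rw [pvScan, dif_neg (by rw [hget]; tauto), hdrop]
        simp only [pvBloomPrefix, if_neg hb]
        omega
    · rw [pvScan, dif_neg (by omega), List.drop_eq_nil_of_le (by omega)]
      simp [pvBloomPrefix]

-- pvCollect from index i is pvRuns on the corresponding suffix
theorem pvCollect_eq_runs (l : List Int) (day : Int) :
    ∀ fuel i, l.length - i ≤ fuel →
      pvCollect l day l.length i = pvRuns day (l.drop i) := by
  intro fuel
  induction fuel with
  | zero =>
    intro i hf
    rw [pvCollect, dif_neg (by omega), List.drop_eq_nil_of_le (by omega)]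
    rw [pvRuns]
  | succ f ihf =>
    intro i hf
    by_cases hi : i < l.length
    · have hdrop := List.drop_eq_getElem_cons hi
      have hget : l.getD i 0 = l[i] := List.getD_eq_getElem l 0 hi
      by_cases hb : day ≥ l[i]
      · have hscan := pvScan_eq_bp l day (l.length - i) i le_rfl
        have hbp : pvBloomPrefix day (l.drop i) ≥ 1 := by
          rw [hdrop]; simp only [pvBloomPrefix, if_pos hb]; omega
        have hj1 : i + 1 ≤ pvScan l day l.length i := by omega
        rw [pvCollect, dif_pos hi, dif_pos (by rw [hget]; exact hb)]
        show (pvScan l day l.length i - i)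
            :: pvCollect l day l.length (pvScan l day l.length i)
          = pvRuns day (l.drop i)
        rw [ihf (pvScan l day l.length i) (by omega), hscan]
        have hRuns : pvRuns day (l.drop i)
            = pvBloomPrefix day (l.drop i)
              :: pvRuns day ((l.drop i).drop (pvBloomPrefix day (l.drop i))) := by
          conv_lhs => rw [hdrop]
          rw [pvRuns, if_neg (not_lt.mpr hb)]
          simp only [← hdrop]
        have hdd : (l.drop i).drop (pvBloomPrefix day (l.drop i))
            = l.drop (i + pvBloomPrefix day (l.drop i)) := by
          rw [List.drop_drop]
        rw [hRuns, hdd]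
        congr 1
        omega
      · rw [pvCollect, dif_pos hi, dif_neg (by rw [hget]; exact hb),
            ihf (i + 1) (by omega)]
        have hRuns2 : pvRuns day (l.drop i) = pvRuns day (l.drop (i + 1)) := by
          rw [hdrop, pvRuns, if_pos (not_le.mp hb)]
        rw [hRuns2]
    · rw [pvCollect, dif_neg (by omega), List.drop_eq_nil_of_le (by omega)]
      rw [pvRuns]


-- division-algorithm step: when the run grows by 1 and completes a bouquet
theorem pv_step_complete (k cur : Int) (hk : 0 < k) (h : k ≤ cur % k + 1) :
    (cur + 1) % k = 0 ∧ (cur + 1) / k = cur / k + 1 := by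
  have hr0 := Int.emod_nonneg cur (ne_of_gt hk)
  have hr1 := Int.emod_lt_of_pos cur hk
  have e : cur % k = k - 1 := by omega
  have h2 := Int.ediv_add_emod cur k
  rw [e] at h2
  have hsum : cur + 1 = k * (cur / k + 1) := by rw [mul_add, mul_one]; linarith
  exact ⟨by rw [hsum, Int.mul_emod_right],
         by rw [hsum, Int.mul_ediv_cancel_left _ (ne_of_gt hk)]⟩

-- division-algorithm step: when the run grows by 1 without completing a bouquet
theorem pv_step_partial (k cur : Int) (hk : 0 < k) (h : cur % k + 1 < k) :
    (cur + 1) % k = cur % k + 1 ∧ (cur + 1) / k = cur / k := by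
  have hr0 := Int.emod_nonneg cur (ne_of_gt hk)
  have h2 := Int.ediv_add_emod cur k
  have u := (Int.ediv_emod_unique'' (a := cur + 1) (b := k) (r := cur % k + 1)
      (q := cur / k) (ne_of_gt hk)).mpr
      ⟨by linarith, by omega, by rw [abs_of_pos hk]; omega⟩
  exact ⟨u.2, u.1⟩

-- folding A over an all-bloomed list advances the (counter, result) pair by the
-- division algorithm: from run length c it reaches run length c + p.length
theorem pv_foldl_bloomed (day k : Int) (hk : 0 < k) (p : List Int)
    (hp : ∀ x ∈ p, day ≥ x) : ∀ (c res : Int),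
    p.foldl (pvStepA day k) (c % k, res + c / k)
      = ((c + p.length) % k, res + (c + p.length) / k) := by
  induction p with
  | nil => intro c res; simp
  | cons x t ih =>
    intro c res
    have hx : day ≥ x := hp x (List.mem_cons_self ..)
    have ht : ∀ y ∈ t, day ≥ y := fun y hy => hp y (List.mem_cons_of_mem _ hy)
    simp only [List.foldl_cons]
    have : pvStepA day k (c % k, res + c / k) x = ((c + 1) % k, res + (c + 1) / k) := by
      by_cases hc : k ≤ c % k + 1
      · obtain ⟨e1, e2⟩ := pv_step_complete k c hk hc
        simp only [pvStepA, if_pos hx]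
        rw [if_pos (by simpa using hc), e1, e2]; ring_nf
      · obtain ⟨e1, e2⟩ := pv_step_partial k c hk (by omega)
        simp only [pvStepA, if_pos hx]
        rw [if_neg (by simpa using hc), e1, e2]
    rw [this, ih ht (c + 1) res]
    have hE : c + 1 + (t.length : Int) = c + ((t.length + 1 : Nat) : Int) := by
      push_cast; ring
    simp only [List.length_cons, hE]

-- the leading bloomed prefix is no longer than the list
theorem pv_bp_le (day : Int) (l : List Int) : pvBloomPrefix day l ≤ l.length := by
  induction l with
  | nil => simp [pvBloomPrefix]
  | cons x t ih =>
    simp only [pvBloomPrefix, List.length_cons]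
    split <;> omega

-- every element of the leading bloomed prefix is bloomed
theorem pv_take_bloomed (day : Int) (l : List Int) :
    ∀ x ∈ l.take (pvBloomPrefix day l), day ≥ x := by
  induction l with
  | nil => simp
  | cons x t ih =>
    simp only [pvBloomPrefix]
    split
    · rename_i hx
      intro y hy
      rw [show 1 + pvBloomPrefix day t = pvBloomPrefix day t + 1 by omega] at hy
      simp only [List.take_succ_cons] at hy
      rcases List.mem_cons.mp hy with h | h
      · exact h ▸ hx
      · exact ih y h
    · simp
-- the element right after the leading bloomed prefix (if any) is not bloomed
theorem pv_drop_head (day : Int) (l : List Int) :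
    ∀ y rest, l.drop (pvBloomPrefix day l) = y :: rest → ¬ day ≥ y := by
  induction l with
  | nil => simp [pvBloomPrefix]
  | cons x t ih =>
    simp only [pvBloomPrefix]
    split
    · rename_i hx
      intro y rest h
      rw [show 1 + pvBloomPrefix day t = pvBloomPrefix day t + 1 by omega] at h
      simp only [List.drop_succ_cons] at h
      exact ih y rest h
    · rename_i hx
      intro y rest h
      simp only [List.drop_zero] at h
      cases h
      exact hx

-- main invariant: A's fold from (0, res) adds exactly the sum of floor(run/k)
theorem pv_main (day k : Int) (hk : 0 < k) : ∀ (n : Nat) (l : List Int), l.length ≤ n →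
    ∀ res : Int, (l.foldl (pvStepA day k) (0, res)).2
      = res + ((pvRuns day l).map (fun (L : Nat) => PySem.Int.floordiv (L : Int) k)).sum := by
  intro n
  induction n with
  | zero =>
    intro l hl res
    have : l = [] := List.eq_nil_of_length_eq_zero (by omega)
    subst this; simp [pvRuns]
  | succ n ih =>
    intro l hl res
    match l with
    | [] => simp [pvRuns]
    | x :: t =>
      by_cases hx : day < x
      · have hA : pvStepA day k (0, res) x = (0, res) := by
          simp [pvStepA, not_le.mpr hx]
        rw [List.foldl_cons, hA, pvRuns, if_pos hx]
        exact ih t (by simpa using Nat.le_of_succ_le_succ hl) res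
      · set m := pvBloomPrefix day (x :: t) with hm
        have hm1 : 1 ≤ m := by
          rw [hm]; simp only [pvBloomPrefix]; rw [if_pos (not_lt.mp hx)]; omega
        have hml : m ≤ (x :: t).length := pv_bp_le day (x :: t)
        have hsplit : (x :: t) = (x :: t).take m ++ (x :: t).drop m :=
          (List.take_append_drop m (x :: t)).symm
        have hflen : ((x :: t).take m).length = m := by
          simp only [List.length_take, List.length_cons] at hml ⊢
          omega
        -- fold over the bloomed prefix
        have h1 : ((x :: t).take m).foldl (pvStepA day k) (0, res)
            = ((m : Int) % k, res + (m : Int) / k) := by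
          have := pv_foldl_bloomed day k hk ((x :: t).take m)
            (pv_take_bloomed day (x :: t)) 0 res
          simpa [hflen, Int.zero_emod, Int.zero_ediv] using this
        -- fold over the rest: after the prefix the counter behaves as if reset
        have h2 : (((x :: t).drop m).foldl (pvStepA day k) ((m : Int) % k, res + (m : Int) / k)).2
            = (((x :: t).drop m).foldl (pvStepA day k) (0, res + (m : Int) / k)).2
          := by
          cases hdrop : (x :: t).drop m with
          | nil => simp
          | cons y rest =>
            have hy : ¬ day ≥ y := pv_drop_head day (x :: t) y rest hdrop
            simp [List.foldl_cons, pvStepA, hy]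
        have hlen2 : ((x :: t).drop m).length ≤ n := by
          simp only [List.length_drop]
          simp only [List.length_cons] at hl hml ⊢
          omega
        have h3 := ih ((x :: t).drop m) hlen2 (res + (m : Int) / k)
        have hfold : ((x :: t).foldl (pvStepA day k) (0, res)).2
            = res + (m : Int) / k
              + ((pvRuns day ((x :: t).drop m)).map
                  (fun (L : Nat) => PySem.Int.floordiv (L : Int) k)).sum := by
          conv_lhs => rw [hsplit]
          rw [List.foldl_append, h1, h2, h3]
        rw [hfold, pvRuns, if_neg hx]
        simp only [List.map_cons, List.sum_cons, ← hm]
        rw [PySem.Int.floordiv_eq_ediv_of_pos hk]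
        ring

-- ===== VERDICT (by name: the statement is the Claim_ definition above) =====
theorem num_bouquets_spec : Claim_equal_num_bouquets := by
  intro bloomDay day k _ hk
  unfold Spec_num_bouquets num_bouquets num_bouquets_alt
  rw [pvCollect_eq_runs bloomDay day bloomDay.length 0 (by omega), List.drop_zero]
  simpa using pv_main day k hk bloomDay.length bloomDay le_rfl 0
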